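-- pv_equiv track=rewrite | github.com/hamanpaul/IntelliDbgKit | src/ingestion/xlsx_loader.py | _select_header_columns
-- ===== SOURCE A (Python) =====
-- def _compact_spaces(text: str) -> str:
--     return " ".join(text.replace("\n", " ").split()).strip()
--
-- def _canonical_header(header: str) -> str | None:
--     normalized = _compact_spaces(header).lower()
--     if not normalized:
--         return None
--     if normalized in {"object", "datamodel"}:
--         return "object_path"
--     if normalized in {"parameter name", "parameter"}:
--         return "parameter_name"
--     if "hlapi" in normalized:
--         return "hlapi_command"
--     if normalized == "llapi":
--         return "llapi_support"
--     if "test steps" in normalized: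
--         return "test_steps"
--     if "command output" in normalized:
--         return "command_output"
--     if "test result" in normalized:
--         return "result_status"
--     if "comment" in normalized:
--         return "comment"
--     if "implemented by" in normalized:
--         return "implemented_by"
--     if "description" in normalized:
--         return "description"
--     return None
--
-- def _priority(header: str) -> int:
--     normalized = _compact_spaces(header).lower()
--     if "bcm v4.0.3" in normalized:
--         return 0
--     if "4.0.1" in normalized:
--         return 1
--     return 2
--
-- def _select_header_columns(header_row: dict[int, str]) -> dict[str, int]:
--     candidate_map: dict[str, list[tuple[int, int]]] = {}
--     for column, title in header_row.items():
--         canonical = _canonical_header(title)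
--         if canonical is None:
--             continue
--         candidate_map.setdefault(canonical, []).append((_priority(title), column))
--     selected: dict[str, int] = {}
--     for canonical, candidates in candidate_map.items():
--         candidates.sort(key=lambda item: (item[0], item[1]))
--         selected[canonical] = candidates[0][1]
--     return selected
-- ===== SOURCE B (Python) =====
-- def _compact_spaces(text: str) -> str:
--     return " ".join(text.replace("\n", " ").split()).strip()
--
-- def _canonical_header(header: str) -> str | None:
--     normalized = _compact_spaces(header).lower()
--     if not normalized:
--         return None
--     if normalized in {"object", "datamodel"}:
--         return "object_path"
--     if normalized in {"parameter name", "parameter"}: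
--         return "parameter_name"
--     if "hlapi" in normalized:
--         return "hlapi_command"
--     if normalized == "llapi":
--         return "llapi_support"
--     if "test steps" in normalized:
--         return "test_steps"
--     if "command output" in normalized:
--         return "command_output"
--     if "test result" in normalized:
--         return "result_status"
--     if "comment" in normalized:
--         return "comment"
--     if "implemented by" in normalized:
--         return "implemented_by"
--     if "description" in normalized:
--         return "description"
--     return None
--
-- def _priority(header: str) -> int:
--     normalized = _compact_spaces(header).lower()
--     if "bcm v4.0.3" in normalized:
--         return 0
--     if "4.0.1" in normalized:
--         return 1
--     return 2
--
-- def _select_header_columns(header_row: dict[int, str]) -> dict[str, int]: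
--     best: dict[str, tuple[int, int]] = {}
--     for column, title in header_row.items():
--         canonical = _canonical_header(title)
--         if canonical is None:
--             continue
--         key = (_priority(title), column)
--         cur = best.get(canonical)
--         if cur is None or key < cur:
--             best[canonical] = key
--     return {canonical: key[1] for canonical, key in best.items()}
-- ===== Notes on version B (the rewrite author's own statement) =====
-- stated objective: simpler
-- what changed: Replaces A's per-canonical candidate-list accumulation followed by a sort of each group with a single pass that keeps a running minimum (priority, column) key per canonical name, so the grouping lists and the sorts disappear.
import Mathlib
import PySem

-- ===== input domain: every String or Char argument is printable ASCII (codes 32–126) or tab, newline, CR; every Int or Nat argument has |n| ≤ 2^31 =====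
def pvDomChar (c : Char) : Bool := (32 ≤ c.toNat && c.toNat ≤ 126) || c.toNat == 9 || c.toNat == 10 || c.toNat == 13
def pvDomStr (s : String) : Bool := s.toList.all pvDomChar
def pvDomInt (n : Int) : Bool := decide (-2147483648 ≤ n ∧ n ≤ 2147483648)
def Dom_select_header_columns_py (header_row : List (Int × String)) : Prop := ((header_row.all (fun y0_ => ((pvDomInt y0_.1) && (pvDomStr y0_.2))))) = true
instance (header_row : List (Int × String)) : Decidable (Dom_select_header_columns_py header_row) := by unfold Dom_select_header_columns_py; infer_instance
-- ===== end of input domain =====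

-- B replaces A's group-then-sort selection by a single running lexicographic minimum per canonical name (objective: simpler).


-- ===== PORT A =====
-- helpers shared by both Pythons (identical source in Source A and Source B)
def compact_spaces (text : String) : String :=
  PySem.Str.strip (PySem.Str.join " " (PySem.Str.split₀ (PySem.Str.replace text "\n" " ")))

def canonical_header (header : String) : Option String :=
  let normalized := PySem.Str.lower (compact_spaces header)
  if normalized = "" then none
  else if normalized = "object" ∨ normalized = "datamodel" then some "object_path"
  else if normalized = "parameter name" ∨ normalized = "parameter" then some "parameter_name"
  else if PySem.Str.isIn "hlapi" normalized then some "hlapi_command"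
  else if normalized = "llapi" then some "llapi_support"
  else if PySem.Str.isIn "test steps" normalized then some "test_steps"
  else if PySem.Str.isIn "command output" normalized then some "command_output"
  else if PySem.Str.isIn "test result" normalized then some "result_status"
  else if PySem.Str.isIn "comment" normalized then some "comment"
  else if PySem.Str.isIn "implemented by" normalized then some "implemented_by"
  else if PySem.Str.isIn "description" normalized then some "description"
  else none

def priority_py (header : String) : Int :=
  let normalized := PySem.Str.lower (compact_spaces header)
  if PySem.Str.isIn "bcm v4.0.3" normalized then 0
  else if PySem.Str.isIn "4.0.1" normalized then 1
  else 2

-- loop body of A's first loop: file one candidate under its canonical name (setdefault(...).append(...))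
def stepA (m : PySem.Dict String (List (Int × Int))) (p : Int × String) :
    PySem.Dict String (List (Int × Int)) :=
  match canonical_header p.2 with
  | none => m
  | some c => m.modify c [] (fun g => g ++ [(priority_py p.2, p.1)])

-- A: group the candidates per canonical name, then sort each group by (priority, column) and take the first
def select_header_columns_py (header_row : List (Int × String)) : List (String × Int) :=
  let d := PySem.Dict.ofList header_row
  let candidate_map : PySem.Dict String (List (Int × Int)) :=
    d.items.foldl stepA PySem.Dict.empty
  let selected : PySem.Dict String Int :=
    candidate_map.items.foldl (fun s p =>
      s.insert p.1 (((PySem.List.sorted2 p.2 (fun q => q.1) (fun q => q.2)).headD (0, 0)).2))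
      PySem.Dict.empty
  selected.items

-- ===== PORT B =====
-- Python tuple '<' on (int, int) pairs
def keyLt (a b : Int × Int) : Bool := a.1 < b.1 || (a.1 == b.1 && a.2 < b.2)

-- loop body of B's loop: keep the smaller (priority, column) key for this canonical name
def stepB (b : PySem.Dict String (Int × Int)) (p : Int × String) :
    PySem.Dict String (Int × Int) :=
  match canonical_header p.2 with
  | none => b
  | some c =>
    let k := (priority_py p.2, p.1)
    match b.get? c with
    | none => b.insert c k
    | some cur => if keyLt k cur then b.insert c k else b

-- B: one pass keeping the per-canonical running minimum (priority, column); no grouping, no sort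
def select_header_columns_py_alt (header_row : List (Int × String)) : List (String × Int) :=
  let d := PySem.Dict.ofList header_row
  let best : PySem.Dict String (Int × Int) :=
    d.items.foldl stepB PySem.Dict.empty
  best.items.map (fun p => (p.1, p.2.2))

-- ===== PRECONDITION & SPEC =====
def Spec_select_header_columns_py (header_row : List (Int × String)) (out : List (String × Int)) : Prop := out = select_header_columns_py_alt header_row
instance (header_row : List (Int × String)) (out : List (String × Int)) : Decidable (Spec_select_header_columns_py header_row out) := by unfold Spec_select_header_columns_py; infer_instance

-- ===== CLAIM (what is proved, stated in full; the proofs are below) =====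
def Claim_equal_select_header_columns_py : Prop := ∀ (header_row : List (Int × String)), Dom_select_header_columns_py header_row → Spec_select_header_columns_py header_row (select_header_columns_py header_row)

-- ===== LEMMAS AND PROOFS =====

-- running lexicographic minimum (ties keep the earlier element), as B maintains it
def bestOf (g : List (Int × Int)) : Int × Int :=
  match g with
  | [] => (0, 0)
  | x :: xs => xs.foldl (fun h k => if keyLt k h then k else h) x

-- sorted2's internal comparator equals keyLt on Int pairs
lemma lt2_eq_keyLt (a b : Int × Int) :
    (decide (a.1 < b.1) || (!decide (b.1 < a.1) && decide (a.2 < b.2))) = keyLt a b := by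
  simp only [keyLt]
  by_cases h1 : a.1 < b.1 <;> by_cases h2 : b.1 < a.1 <;> by_cases h3 : a.2 < b.2 <;>
    simp [h1, h2, h3] <;> omega

lemma foldl_insertBy_head {α : Type} (before : α → α → Bool) :
    ∀ (xs : List α) (a : α) (as_ : List α),
      ∃ t, xs.foldl (fun acc x => PySem.List.insertBy before x acc) (a :: as_) =
        (xs.foldl (fun h x => if before x h then x else h) a) :: t := by
  intro xs
  induction xs with
  | nil => intro a as_; exact ⟨as_, rfl⟩
  | cons y ys ih =>
      intro a as_
      simp only [List.foldl_cons, PySem.List.insertBy]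
      by_cases h : before y a = true
      · simpa [h] using ih y (a :: as_)
      · simpa [h] using ih a (PySem.List.insertBy before y as_)

lemma head_sorted2 (x : Int × Int) (xs : List (Int × Int)) :
    (PySem.List.sorted2 (x :: xs) (fun q => q.1) (fun q => q.2)).head?.getD (0, 0) = bestOf (x :: xs) := by
  unfold PySem.List.sorted2 bestOf
  simp only [if_neg (by simp : ¬(false = true)), List.foldl_cons, PySem.List.insertBy]
  obtain ⟨t, ht⟩ := foldl_insertBy_head
    (fun a b : Int × Int => decide (a.1 < b.1) || (!decide (b.1 < a.1) && decide (a.2 < b.2))) xs x []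
  rw [ht]
  simp only [List.head?_cons, Option.getD_some]
  congr 1
  funext h k
  rw [lt2_eq_keyLt]

lemma bestOf_append (x : Int × Int) (xs : List (Int × Int)) (k : Int × Int) :
    bestOf (x :: (xs ++ [k])) = if keyLt k (bestOf (x :: xs)) then k else bestOf (x :: xs) := by
  simp [bestOf, List.foldl_append]

-- the invariant relating A's group map and B's running-minimum map
def DictInv (m : PySem.Dict String (List (Int × Int))) (b : PySem.Dict String (Int × Int)) : Prop :=
  m.keys.Nodup ∧ (∀ p ∈ m.items, p.2 ≠ []) ∧
    b.items = m.items.map (fun p => (p.1, bestOf p.2))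

lemma keys_of_inv (m : PySem.Dict String (List (Int × Int))) (b : PySem.Dict String (Int × Int))
    (h : DictInv m b) : b.keys = m.keys := by
  obtain ⟨-, -, hb⟩ := h
  simp only [PySem.Dict.keys, hb, List.map_map]
  rfl

lemma inv_step (m : PySem.Dict String (List (Int × Int))) (b : PySem.Dict String (Int × Int))
    (h : DictInv m b) (p : Int × String) :
    DictInv (stepA m p) (stepB b p) := by
  unfold stepA stepB
  obtain ⟨hnd, hne, hb⟩ := h
  obtain hch | ⟨c, hch⟩ : canonical_header p.2 = none ∨ ∃ c, canonical_header p.2 = some c := by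
    cases canonical_header p.2 <;> simp
  · simp only [hch]
    exact ⟨hnd, hne, hb⟩
  · simp only [hch]
    have hbk : b.keys = m.keys := keys_of_inv m b ⟨hnd, hne, hb⟩
    by_cases hc : m.contains c = true
    · -- c already has a group g
      obtain ⟨g, hg⟩ : ∃ g, m.get? c = some g := by
        rw [PySem.Dict.contains_eq_isSome_get?] at hc
        exact Option.isSome_iff_exists.mp hc
      have hmem : (c, g) ∈ m.items := PySem.Dict.mem_items_of_get?_eq_some m hg
      have hbmem : (c, bestOf g) ∈ b.items := by
        rw [hb]; exact List.mem_map.mpr ⟨(c, g), hmem, rfl⟩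
      have hbnd : b.keys.Nodup := by rw [hbk]; exact hnd
      have hbget : b.get? c = some (bestOf g) := PySem.Dict.get?_of_mem_items b hbmem hbnd
      have hbc : b.contains c = true := by
        rw [PySem.Dict.contains_eq_isSome_get?, hbget]; rfl
      have hgd : m.getD c [] = g := by rw [PySem.Dict.getD_eq_get?_getD, hg]; rfl
      have hmi : (m.modify c [] (fun g => g ++ [(priority_py p.2, p.1)])).items =
          m.items.map (fun q => if q.1 == c then (c, g ++ [(priority_py p.2, p.1)]) else q) := by
        show (m.insert c (m.getD c [] ++ [(priority_py p.2, p.1)])).items = _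
        rw [hgd, PySem.Dict.items_insert_of_contains m _ hc]
      have hval : ∀ q ∈ m.items, q.1 = c → q.2 = g := by
        intro q hq hqc
        have hq' : (c, q.2) ∈ m.items := by rw [← hqc]; exact hq
        have := PySem.Dict.get?_of_mem_items m hq' hnd
        rw [hg] at this; exact (Option.some_inj.mp this).symm
      refine ⟨PySem.Dict.nodup_keys_insert m c _ hnd, ?_, ?_⟩
      · intro q hq
        rw [hmi] at hq
        obtain ⟨r, hr, hrq⟩ := List.mem_map.mp hq
        subst hrq
        by_cases hrc : (r.1 == c) = true
        · simp [hrc]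
        · simpa [hrc] using hne r hr
      · simp only [hbget, hmi, List.map_map]
        by_cases hlt : keyLt (priority_py p.2, p.1) (bestOf g) = true
        · rw [if_pos hlt, PySem.Dict.items_insert_of_contains b _ hbc, hb, List.map_map]
          apply List.map_congr_left
          intro q hq
          by_cases hqc : q.1 = c
          · have hq2 : q.2 = g := hval q hq hqc
            have hgne : g ≠ [] := hq2 ▸ hne q hq
            obtain ⟨x, xs, hx⟩ := List.exists_cons_of_ne_nil hgne
            subst hx
            simp [Function.comp, hqc, bestOf_append, hlt]
          · simp [Function.comp, hqc]
        · rw [if_neg hlt, hb]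
          apply List.map_congr_left
          intro q hq
          by_cases hqc : q.1 = c
          · have hq2 : q.2 = g := hval q hq hqc
            have hgne : g ≠ [] := hq2 ▸ hne q hq
            obtain ⟨x, xs, hx⟩ := List.exists_cons_of_ne_nil hgne
            rw [hx] at hlt
            simp [Function.comp, hqc, hq2, hx, bestOf_append, hlt]
          · simp [Function.comp, hqc]
    · -- c is a new canonical name
      have hc' : m.contains c = false := by simpa using hc
      have hbc : b.contains c = false := by
        have h1 := PySem.Dict.contains_eq_decide_mem_keys b c
        have h2 := PySem.Dict.contains_eq_decide_mem_keys m c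
        rw [h1, hbk, ← h2]; exact hc'
      have hbget : b.get? c = none := (PySem.Dict.get?_eq_none_iff_contains b c).mpr hbc
      have hgd : m.getD c [] = [] := PySem.Dict.getD_of_not_contains m [] hc'
      have hmi : (m.modify c [] (fun g => g ++ [(priority_py p.2, p.1)])).items =
          m.items ++ [(c, [(priority_py p.2, p.1)])] := by
        show (m.insert c (m.getD c [] ++ [(priority_py p.2, p.1)])).items = _
        rw [hgd, PySem.Dict.items_insert_of_not_contains m _ hc']; rfl
      refine ⟨?_, ?_, ?_⟩
      · exact PySem.Dict.nodup_keys_insert m c _ hnd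
      · intro q hq
        rw [hmi] at hq
        rcases List.mem_append.mp hq with hq | hq
        · exact hne q hq
        · simp only [List.mem_singleton] at hq; subst hq; simp
      · simp only [hbget, hmi]
        rw [PySem.Dict.items_insert_of_not_contains b _ hbc, hb, List.map_append]
        rfl

lemma inv_foldl (l : List (Int × String)) :
    ∀ (m : PySem.Dict String (List (Int × Int))) (b : PySem.Dict String (Int × Int)),
      DictInv m b →
      DictInv (l.foldl stepA m) (l.foldl stepB b) := by
  induction l with
  | nil => intro m b h; exact h
  | cons p l ih =>
      intro m b h
      rw [List.foldl_cons, List.foldl_cons]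
      exact ih _ _ (inv_step m b h p)

lemma final_eq (l : List (Int × String)) :
    (List.foldl (fun s p =>
        s.insert p.1 (((PySem.List.sorted2 p.2 (fun q => q.1) (fun q => q.2)).headD (0, 0)).2))
      PySem.Dict.empty
      (List.foldl stepA PySem.Dict.empty l).items).items =
    List.map (fun p => (p.1, p.2.2))
      (List.foldl stepB PySem.Dict.empty l).items := by
  obtain ⟨hnd, hne, hb⟩ := inv_foldl l PySem.Dict.empty PySem.Dict.empty
    ⟨PySem.Dict.nodup_keys_empty, by simp [PySem.Dict.empty], by simp [PySem.Dict.empty]⟩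
  simp only [PySem.Dict.keys] at hnd
  have hfresh := PySem.Dict.items_foldl_insert_fresh (κ := String) (ν := Int)
    (β := String × List (Int × Int)) _ (fun p => p.1)
    (fun p => ((PySem.List.sorted2 p.2 (fun q => q.1) (fun q => q.2)).headD (0, 0)).2)
    PySem.Dict.empty (fun a _ => rfl) hnd
  rw [hfresh, hb, List.map_map]
  simp only [PySem.Dict.empty, List.nil_append]
  apply List.map_congr_left
  intro q hq
  have hgne := hne q hq
  obtain ⟨x, xs, hx⟩ := List.exists_cons_of_ne_nil hgne
  simp [Function.comp, hx, head_sorted2]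

-- ===== VERDICT (by name: the statement is the Claim_ definition above) =====
theorem select_header_columns_py_spec : Claim_equal_select_header_columns_py := by
  intro header_row _
  show select_header_columns_py header_row = select_header_columns_py_alt header_row
  exact final_eq (PySem.Dict.ofList header_row).items
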